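-- pv_equiv track=rewrite | github.com/felixarpa/LP-Python | src/main.py | eval_metro
-- ===== SOURCE A (Python) =====
-- def eval_metro(expr, pos):
--     if len(expr) == 2:
--         expr.insert(0, '\"')
--         expr.insert(3, '\"')
--         return ''.join(expr)
--     if pos >= len(expr):
--         return ''.join(expr)
--     if expr[pos] == '[' or expr[pos] == ',':
--         expr.insert(pos + 1, '\"')
--         expr.insert(pos + 4, '\"')
--         return eval_metro(expr, pos + 5)
--     else:
--         return eval_metro(expr, pos + 1)
-- ===== SOURCE B (Python) =====
-- def eval_metro(expr, pos):
--     # Mutates expr in place, like the original.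
--     if len(expr) == 2:
--         expr.insert(0, '"')
--         expr.insert(3, '"')
--         return ''.join(expr)
--     while pos < len(expr):
--         if expr[pos] == '[' or expr[pos] == ',':
--             expr.insert(pos + 1, '"')
--             expr.insert(pos + 4, '"')
--             pos += 5
--         else:
--             pos += 1
--     return ''.join(expr)
-- ===== Notes on version B (the rewrite author's own statement) =====
-- stated objective: alternative
-- what changed: Replaces A's tail recursion with an iterative while-loop over the index that performs the same in-place insertions and joins once at the end (the len==2 special case is kept); B mutates expr in place exactly as A does.
import Mathlib
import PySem

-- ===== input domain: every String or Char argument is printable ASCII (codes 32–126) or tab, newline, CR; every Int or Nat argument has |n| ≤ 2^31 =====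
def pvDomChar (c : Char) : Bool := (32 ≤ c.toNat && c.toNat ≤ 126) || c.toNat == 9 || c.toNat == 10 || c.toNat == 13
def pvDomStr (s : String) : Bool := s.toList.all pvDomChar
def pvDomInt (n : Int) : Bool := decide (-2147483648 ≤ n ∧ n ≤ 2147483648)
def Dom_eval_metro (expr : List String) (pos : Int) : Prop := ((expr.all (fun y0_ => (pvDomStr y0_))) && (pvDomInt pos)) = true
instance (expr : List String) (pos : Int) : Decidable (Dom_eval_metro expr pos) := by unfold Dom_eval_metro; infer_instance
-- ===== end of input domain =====

-- B replaces A's tail recursion by an in-place while-loop over the same index (different decomposition; same speed).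


-- ===== PORT A =====
-- literal transliteration of A; expr[pos] where Python would raise IndexError yields "" (excluded by Pre_)
def eval_metro (expr : List String) (pos : Int) : String :=
  if expr.length = 2 then
    PySem.Str.join "" (PySem.List.insert (PySem.List.insert expr 0 "\"") 3 "\"")
  else if (expr.length : Int) ≤ pos then
    PySem.Str.join "" expr
  else
    match h : PySem.List.pyGet? expr pos with
    | none => ""
    | some c =>
      if c = "[" ∨ c = "," then
        eval_metro (PySem.List.insert (PySem.List.insert expr (pos + 1) "\"") (pos + 4) "\"") (pos + 5)
      else
        eval_metro expr (pos + 1)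
termination_by ((expr.length : Int) - pos).toNat
decreasing_by
  · simp [PySem.List.length_insert]; omega
  · omega

-- ===== PORT B =====
-- the while-loop of Source B: state = (expr, pos); returns the final expr, none = IndexError
def evalMetroLoop (expr : List String) (pos : Int) : Option (List String) :=
  if (expr.length : Int) ≤ pos then some expr
  else
    match h : PySem.List.pyGet? expr pos with
    | none => none
    | some c =>
      if c = "[" ∨ c = "," then
        evalMetroLoop (PySem.List.insert (PySem.List.insert expr (pos + 1) "\"") (pos + 4) "\"") (pos + 5)
      else
        evalMetroLoop expr (pos + 1)
termination_by ((expr.length : Int) - pos).toNat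
decreasing_by
  · simp [PySem.List.length_insert]; omega
  · omega

def eval_metro_alt (expr : List String) (pos : Int) : String :=
  if expr.length = 2 then
    PySem.Str.join "" (PySem.List.insert (PySem.List.insert expr 0 "\"") 3 "\"")
  else
    match evalMetroLoop expr pos with
    | none => ""
    | some e => PySem.Str.join "" e

-- ===== PRECONDITION & SPEC =====
-- Pre_ excludes exactly the inputs where A raises IndexError (pos below -len(expr), first element access).
def Pre_eval_metro (expr : List String) (pos : Int) : Prop :=
  expr.length = 2 ∨ -(expr.length : Int) ≤ pos
instance (expr : List String) (pos : Int) : Decidable (Pre_eval_metro expr pos) := by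
  unfold Pre_eval_metro; infer_instance
def pvWitness_eval_metro : List String × Int := (["[", "a", ",", "b", "]"], 0)
def Spec_eval_metro (expr : List String) (pos : Int) (out : String) : Prop := out = eval_metro_alt expr pos
instance (expr : List String) (pos : Int) (out : String) : Decidable (Spec_eval_metro expr pos out) := by unfold Spec_eval_metro; infer_instance

-- ===== CLAIM (what is proved, stated in full; the proofs are below) =====
def Claim_equal_eval_metro : Prop := ∀ (expr : List String) (pos : Int), Dom_eval_metro expr pos → Pre_eval_metro expr pos → Spec_eval_metro expr pos (eval_metro expr pos)

-- ===== LEMMAS AND PROOFS =====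

-- unfolding equation for the loop when expr[pos] exists
theorem loop_step (expr : List String) (pos : Int) (c : String)
    (hlt : ¬ (expr.length : Int) ≤ pos) (hget : PySem.List.pyGet? expr pos = some c) :
    evalMetroLoop expr pos =
      (if c = "[" ∨ c = "," then
        evalMetroLoop (PySem.List.insert (PySem.List.insert expr (pos + 1) "\"") (pos + 4) "\"") (pos + 5)
      else evalMetroLoop expr (pos + 1)) := by
  rw [evalMetroLoop, if_neg hlt]
  split
  · simp_all
  · rename_i c' hget'
    rw [hget] at hget'
    cases hget'
    rfl

-- A's recursion computes the loop-then-join of B whenever the len==2 branch is not taken.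
theorem eval_metro_eq_loop (expr : List String) (pos : Int) (h2 : expr.length ≠ 2) :
    eval_metro expr pos =
      (match evalMetroLoop expr pos with
       | none => ""
       | some e => PySem.Str.join "" e) := by
  fun_induction eval_metro expr pos with
  | case1 expr pos h => exact absurd h h2
  | case2 expr pos h hle =>
      rw [evalMetroLoop, if_pos hle]
  | case3 expr pos h hlt hget =>
      rw [evalMetroLoop, if_neg hlt]
      split
      · rfl
      · rename_i c' hget'
        rw [hget] at hget'
        cases hget'
  | case4 expr pos h hlt c hget hbr ih =>
      rw [loop_step expr pos c hlt hget, if_pos hbr]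
      have hne : expr ≠ [] := by
        intro he; subst he; simp [PySem.List.pyGet?] at hget
      have h0 : 0 < expr.length := List.length_pos_of_ne_nil hne
      have hlen : (PySem.List.insert (PySem.List.insert expr (pos + 1) "\"") (pos + 4) "\"").length ≠ 2 := by
        simp [PySem.List.length_insert]; omega
      exact ih hlen
  | case5 expr pos h hlt c hget hbr ih =>
      rw [loop_step expr pos c hlt hget, if_neg (by simp [hbr])]
      exact ih h

-- ===== VERDICT (by name: the statement is the Claim_ definition above) =====
theorem eval_metro_spec : Claim_equal_eval_metro := by
  intro expr pos _ _
  unfold Spec_eval_metro eval_metro_alt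
  by_cases h2 : expr.length = 2
  · rw [eval_metro, if_pos h2, if_pos h2]
  · rw [if_neg h2]
    exact eval_metro_eq_loop expr pos h2
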